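-- pv_equiv track=rewrite | github.com/g610g/ray-cuda | tests/test_modules.py | identify_trusted_regions
-- ===== SOURCE A (Python) =====
-- def in_spectrum(spectrum, target_kmer):
--     for kmer in spectrum:
--         if target_kmer == kmer[0]:
--             return True
--     return False
--
-- def mark_solids_array(solids, start, end):
--
--     for i in range(start, end):
--         solids[i] = 1
--
-- def transform_to_key(ascii_kmer, len):
--     multiplier = 1
--     key = 0
--     while len != 0:
--         key += ascii_kmer[len - 1] * multiplier
--         multiplier *= 10
--         len -= 1
--
--     return key
--
-- def identify_solid_bases(local_read, kmer_len, kmer_spectrum, solids, size, aux_kmer):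
--
--     for idx in range(0, size + 1):
--         copy_kmer(aux_kmer, local_read, idx, idx + kmer_len)
--         curr_kmer = transform_to_key(aux_kmer, kmer_len)
--
--         # set the bases as solids
--         if in_spectrum(kmer_spectrum, curr_kmer):
--             mark_solids_array(solids, idx, (idx + kmer_len))
--
-- def identify_trusted_regions(
--     seq_len, kmer_spectrum, local_reads, kmer_len, region_indices, solids, aux_kmer
-- ):
--     size = seq_len - kmer_len
--     identify_solid_bases(local_reads, kmer_len, kmer_spectrum, solids, size, aux_kmer)
--     current_indices_idx = 0
--     base_count = 0
--     region_start = 0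
--     region_end = 0
--
--     # idx will be a relative index
--     for idx in range(seq_len):
--
--         # a trusted region has been found. Append it into the identified regions
--         if base_count >= kmer_len and solids[idx] == -1:
--
--             (
--                 region_indices[current_indices_idx][0],
--                 region_indices[current_indices_idx][1],
--             ) = (region_start, region_end)
--             region_start = idx + 1
--             region_end = idx + 1
--             current_indices_idx += 1
--             base_count = 0
--
--         # reset the region start since its left part is not a trusted region anymore
--         if solids[idx] == -1 and base_count < kmer_len:
--             region_start = idx + 1
--             region_end = idx + 1
--             base_count = 0
--
--         if solids[idx] == 1:
--             region_end = idx
--             base_count += 1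
--
--     # ending
--     if base_count >= kmer_len:
--
--         (
--             region_indices[current_indices_idx][0],
--             region_indices[current_indices_idx][1],
--         ) = (region_start, region_end)
--         current_indices_idx += 1
--
--     # this will be the length or the number of trusted regions
--     return current_indices_idx
--
-- def copy_kmer(aux_kmer, local_read, start, end):
--     if end  > len(local_read):
--         return -1
--     for i in range(start, end):
--         aux_kmer[i - start] = local_read[i]
--     return 1
-- ===== SOURCE B (Python) =====
-- def in_spectrum(spectrum, target_kmer):
--     for kmer in spectrum:
--         if target_kmer == kmer[0]:
--             return True
--     return False
--
-- def mark_solids_array(solids, start, end):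
--     for i in range(start, end):
--         solids[i] = 1
--
-- def transform_to_key(ascii_kmer, len):
--     multiplier = 1
--     key = 0
--     while len != 0:
--         key += ascii_kmer[len - 1] * multiplier
--         multiplier *= 10
--         len -= 1
--     return key
--
-- def copy_kmer(aux_kmer, local_read, start, end):
--     if end > len(local_read):
--         return -1
--     for i in range(start, end):
--         aux_kmer[i - start] = local_read[i]
--     return 1
--
-- def identify_solid_bases(local_read, kmer_len, kmer_spectrum, solids, size, aux_kmer):
--     for idx in range(0, size + 1):
--         copy_kmer(aux_kmer, local_read, idx, idx + kmer_len)
--         curr_kmer = transform_to_key(aux_kmer, kmer_len)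
--         if in_spectrum(kmer_spectrum, curr_kmer):
--             mark_solids_array(solids, idx, (idx + kmer_len))
--
-- def identify_trusted_regions(
--     seq_len, kmer_spectrum, local_reads, kmer_len, region_indices, solids, aux_kmer
-- ):
--     # mark solid bases in place, exactly as before
--     identify_solid_bases(
--         local_reads, kmer_len, kmer_spectrum, solids, seq_len - kmer_len, aux_kmer
--     )
--     # stage 1: split the scanned prefix of solids into segments bounded by -1 entries
--     segments = []
--     current = []
--     for v in solids[:max(seq_len, 0)]:
--         if v == -1:
--             segments.append(current)
--             current = []
--         else:
--             current.append(v)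
--     segments.append(current)
--     # stage 2: a trusted region is a segment holding at least kmer_len solid (== 1) bases
--     return sum(1 for seg in segments if seg.count(1) >= kmer_len)
-- ===== Notes on version B (the rewrite author's own statement) =====
-- stated objective: simpler
-- what changed: Keeps the solid-base marking helpers verbatim and replaces A's single-pass region state machine (three sequential conditionals juggling current_indices_idx/base_count/region_start/region_end and in-place region_indices writes) with two staged passes: split the scanned prefix of solids into segments bounded by -1 entries, then count the segments containing at least kmer_len ones; region_indices is no longer written, the equivalence is about the returned region count.
-- outside the precondition, e.g. on identify_trusted_regions(1, [], [1], 1, [], [-1], [0]): A returns 0, B returns 0; on identify_trusted_regions(1, [[5], []], [5], 1, [[0, 0]], [-1], [0]): A returns 1, B returns 1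
import Mathlib
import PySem

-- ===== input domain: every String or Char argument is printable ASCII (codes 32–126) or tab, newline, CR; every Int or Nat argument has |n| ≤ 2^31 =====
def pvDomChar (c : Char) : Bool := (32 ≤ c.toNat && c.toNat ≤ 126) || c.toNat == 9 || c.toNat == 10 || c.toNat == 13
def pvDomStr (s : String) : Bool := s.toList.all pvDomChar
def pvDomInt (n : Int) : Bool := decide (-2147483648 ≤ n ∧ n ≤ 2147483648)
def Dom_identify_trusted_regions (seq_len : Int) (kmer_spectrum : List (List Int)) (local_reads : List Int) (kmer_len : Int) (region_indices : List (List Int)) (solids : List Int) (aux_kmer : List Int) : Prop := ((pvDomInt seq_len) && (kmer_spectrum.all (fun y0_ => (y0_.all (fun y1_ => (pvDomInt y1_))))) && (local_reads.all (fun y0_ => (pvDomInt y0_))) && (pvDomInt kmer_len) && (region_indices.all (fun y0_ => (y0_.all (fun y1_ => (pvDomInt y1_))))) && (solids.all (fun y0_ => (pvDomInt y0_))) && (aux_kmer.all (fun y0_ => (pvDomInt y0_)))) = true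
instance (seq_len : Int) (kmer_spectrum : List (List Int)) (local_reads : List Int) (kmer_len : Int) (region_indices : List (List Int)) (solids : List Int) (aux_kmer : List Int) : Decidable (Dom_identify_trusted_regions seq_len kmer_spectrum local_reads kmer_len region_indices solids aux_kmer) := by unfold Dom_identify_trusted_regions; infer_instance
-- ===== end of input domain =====

-- B keeps the solid-base marking helpers verbatim and replaces A's single-pass region state
-- machine by two staged passes: split the scanned prefix of solids into -1-bounded segments,
-- then count the segments holding at least kmer_len ones; same cost, simpler. Both programs
-- mutate solids/aux_kmer in place and A also writes region_indices: the equivalence proved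
-- here is about the RETURN value (the number of trusted regions) only.

-- ===== PORT A =====
-- A's helpers
def in_spectrum (spectrum : List (List Int)) (target_kmer : Int) : Bool :=
  match spectrum with
  | [] => false
  | kmer :: rest =>
      -- kmer[0]: total form; Pre_ guarantees rows reached are nonempty
      if target_kmer = PySem.List.pyGetD kmer 0 0 then true
      else in_spectrum rest target_kmer

def mark_solids_array (solids : List Int) (start fin : Int) : List Int :=
  (PySem.List.pyRange start fin 1).foldl (fun s i => PySem.List.pySetD s i 1) solids

-- the while-loop of transform_to_key, counting len down to 0 (Pre_ gives 0 ≤ kmer_len)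
def transform_go (ascii_kmer : List Int) : Nat → Int → Int → Int
  | 0, _multiplier, key => key
  | n + 1, multiplier, key =>
      transform_go ascii_kmer n (multiplier * 10)
        (key + PySem.List.pyGetD ascii_kmer (n : Int) 0 * multiplier)

def transform_to_key (ascii_kmer : List Int) (len : Int) : Int :=
  transform_go ascii_kmer len.toNat 1 0

-- returns (Python's return value, the mutated aux_kmer)
def copy_kmer (aux_kmer : List Int) (local_read : List Int) (start fin : Int) : Int × List Int :=
  if fin > PySem.List.len local_read then (-1, aux_kmer)
  else (1, (PySem.List.pyRange start fin 1).foldl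
      (fun a i => PySem.List.pySetD a (i - start) (PySem.List.pyGetD local_read i 0)) aux_kmer)

-- returns the mutated (solids, aux_kmer)
def identify_solid_bases (local_read : List Int) (kmer_len : Int) (kmer_spectrum : List (List Int)) (solids : List Int) (size : Int) (aux_kmer : List Int) : List Int × List Int :=
  (PySem.List.pyRange 0 (size + 1) 1).foldl
    (fun st idx =>
      let cp := copy_kmer st.2 local_read idx (idx + kmer_len)
      let curr_kmer := transform_to_key cp.2 kmer_len
      if in_spectrum kmer_spectrum curr_kmer then
        (mark_solids_array st.1 idx (idx + kmer_len), cp.2)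
      else (st.1, cp.2))
    (solids, aux_kmer)

-- region_indices[i][0], region_indices[i][1] = (s, e)  (total form; Pre_ keeps it in range)
def set_region (region_indices : List (List Int)) (i s e : Int) : List (List Int) :=
  match PySem.List.pyGet? region_indices i with
  | none => region_indices
  | some row => PySem.List.pySetD region_indices i (PySem.List.pySetD (PySem.List.pySetD row 0 s) 1 e)

-- A's loop body; state = (current_indices_idx, base_count, region_start, region_end, region_indices)
def itr_stepA (kmer_len : Int) (solids2 : List Int) (st : Int × Int × Int × Int × List (List Int)) (idx : Int) : Int × Int × Int × Int × List (List Int) :=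
  let s := PySem.List.pyGetD solids2 idx 0
  let st1 := if kmer_len ≤ st.2.1 ∧ s = -1 then
      (st.1 + 1, 0, idx + 1, idx + 1, set_region st.2.2.2.2 st.1 st.2.2.1 st.2.2.2.1)
    else st
  let st2 := if s = -1 ∧ st1.2.1 < kmer_len then
      (st1.1, 0, idx + 1, idx + 1, st1.2.2.2.2)
    else st1
  if s = 1 then (st2.1, st2.2.1 + 1, st2.2.2.1, idx, st2.2.2.2.2) else st2

-- the ending: final region write and the returned count
def itr_finishA (kmer_len : Int) (st : Int × Int × Int × Int × List (List Int)) : Int :=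
  if kmer_len ≤ st.2.1 then
    let _ := set_region st.2.2.2.2 st.1 st.2.2.1 st.2.2.2.1
    st.1 + 1
  else st.1

def identify_trusted_regions (seq_len : Int) (kmer_spectrum : List (List Int)) (local_reads : List Int) (kmer_len : Int) (region_indices : List (List Int)) (solids : List Int) (aux_kmer : List Int) : Int :=
  itr_finishA kmer_len
    ((PySem.List.pyRange 0 seq_len 1).foldl
      (itr_stepA kmer_len
        (identify_solid_bases local_reads kmer_len kmer_spectrum solids (seq_len - kmer_len) aux_kmer).1)
      (0, 0, 0, 0, region_indices))

-- ===== PORT B =====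
-- stage 1 of B's extraction: split into -1-bounded segments; state = (segments, current)
def split_step (st : List (List Int) × List Int) (v : Int) : List (List Int) × List Int :=
  if v = -1 then (st.1 ++ [st.2], []) else (st.1, st.2 ++ [v])

-- the segment list stage 1 produces: the folded segments plus the final current segment
def segs_of (vs : List Int) : List (List Int) :=
  ((vs.foldl split_step ([], [])).1) ++ [(vs.foldl split_step ([], [])).2]

def identify_trusted_regions_alt (seq_len : Int) (kmer_spectrum : List (List Int)) (local_reads : List Int) (kmer_len : Int) (region_indices : List (List Int)) (solids : List Int) (aux_kmer : List Int) : Int :=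
  -- stage 2: sum(1 for seg in segments if seg.count(1) >= kmer_len)
  (((segs_of (PySem.List.slice
        (identify_solid_bases local_reads kmer_len kmer_spectrum solids (seq_len - kmer_len) aux_kmer).1
        none (some (max seq_len 0)))).countP
      (fun seg => decide (kmer_len ≤ (PySem.List.count seg 1 : Int)))) : Int)

-- ===== PRECONDITION & SPEC =====
-- Pre_ = inputs on which the Python A returns normally: kmer_len ≥ 0 (a negative one makes
-- transform_to_key loop forever), solids long enough for the seq_len-scan, aux_kmer long
-- enough and spectrum rows nonempty when the marking loop runs, and region_indices with
-- enough rows of length ≥ 2 for every region write; region writes are bounded by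
-- ⌊(max(seq_len,0)+1)/(kmer_len+1)⌋, so Pre_ demands rows only up to that bound.  Pre_ is
-- slightly conservative: it also excludes some inputs on which A returns because a short
-- region row or an empty spectrum row is never actually touched (see the cites).
def Pre_identify_trusted_regions (seq_len : Int) (kmer_spectrum : List (List Int)) (local_reads : List Int) (kmer_len : Int) (region_indices : List (List Int)) (solids : List Int) (aux_kmer : List Int) : Prop :=
  0 ≤ kmer_len ∧
  seq_len ≤ (solids.length : Int) ∧
  (kmer_len ≤ seq_len → kmer_len ≤ (aux_kmer.length : Int) ∧ ∀ row ∈ kmer_spectrum, row ≠ []) ∧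
  (PySem.Int.floordiv (max seq_len 0 + 1) (kmer_len + 1)).toNat ≤ region_indices.length ∧
  ∀ row ∈ region_indices.take (PySem.Int.floordiv (max seq_len 0 + 1) (kmer_len + 1)).toNat, 2 ≤ row.length

instance (seq_len : Int) (kmer_spectrum : List (List Int)) (local_reads : List Int) (kmer_len : Int) (region_indices : List (List Int)) (solids : List Int) (aux_kmer : List Int) : Decidable (Pre_identify_trusted_regions seq_len kmer_spectrum local_reads kmer_len region_indices solids aux_kmer) := by unfold Pre_identify_trusted_regions; infer_instance

def pvWitness_identify_trusted_regions : Int × List (List Int) × List Int × Int × List (List Int) × List Int × List Int :=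
  (3, [[102]], [1, 0, 2], 2, [[0, 0], [0, 0]], [-1, -1, -1], [0, 0])

def Spec_identify_trusted_regions (seq_len : Int) (kmer_spectrum : List (List Int)) (local_reads : List Int) (kmer_len : Int) (region_indices : List (List Int)) (solids : List Int) (aux_kmer : List Int) (out : Int) : Prop := out = identify_trusted_regions_alt seq_len kmer_spectrum local_reads kmer_len region_indices solids aux_kmer
instance (seq_len : Int) (kmer_spectrum : List (List Int)) (local_reads : List Int) (kmer_len : Int) (region_indices : List (List Int)) (solids : List Int) (aux_kmer : List Int) (out : Int) : Decidable (Spec_identify_trusted_regions seq_len kmer_spectrum local_reads kmer_len region_indices solids aux_kmer out) := by unfold Spec_identify_trusted_regions; infer_instance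

-- ===== CLAIM (what is proved, stated in full; the proofs are below) =====
def Claim_equal_identify_trusted_regions : Prop := ∀ (seq_len : Int) (kmer_spectrum : List (List Int)) (local_reads : List Int) (kmer_len : Int) (region_indices : List (List Int)) (solids : List Int) (aux_kmer : List Int), Dom_identify_trusted_regions seq_len kmer_spectrum local_reads kmer_len region_indices solids aux_kmer → Pre_identify_trusted_regions seq_len kmer_spectrum local_reads kmer_len region_indices solids aux_kmer → Spec_identify_trusted_regions seq_len kmer_spectrum local_reads kmer_len region_indices solids aux_kmer (identify_trusted_regions seq_len kmer_spectrum local_reads kmer_len region_indices solids aux_kmer)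

-- ===== LEMMAS AND PROOFS =====

-- the common abstraction of both counts: number of regions contributed by the value
-- sequence vs, given b ones already seen in the current segment
def itrCount (k : Int) : Int → List Int → Int
  | b, [] => if k ≤ b then 1 else 0
  | b, v :: vs =>
      if v = -1 then (if k ≤ b then 1 else 0) + itrCount k 0 vs
      else if v = 1 then itrCount k (b + 1) vs
      else itrCount k b vs

lemma itrCount_nil (k b : Int) : itrCount k b [] = if k ≤ b then 1 else 0 := rfl

lemma itrCount_cons (k b v : Int) (vs : List Int) :
    itrCount k b (v :: vs)
      = if v = -1 then (if k ≤ b then 1 else 0) + itrCount k 0 vs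
        else if v = 1 then itrCount k (b + 1) vs
        else itrCount k b vs := rfl

-- A's fold followed by the ending computes st.1 + itrCount over the values it reads
lemma itr_foldA_count (k : Int) (sol : List Int) :
    ∀ (idxs : List Int) (st : Int × Int × Int × Int × List (List Int)),
      itr_finishA k (idxs.foldl (itr_stepA k sol) st)
        = st.1 + itrCount k st.2.1 (idxs.map (fun i => PySem.List.pyGetD sol i 0)) := by
  intro idxs
  induction idxs with
  | nil =>
      intro st
      simp only [List.foldl_nil, List.map_nil, itrCount_nil, itr_finishA]
      split_ifs <;> ring
  | cons idx rest ih =>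
      intro st
      obtain ⟨c, b, rs, re, ri⟩ := st
      simp only [List.foldl_cons, List.map_cons, itrCount_cons]
      by_cases hm : PySem.List.pyGetD sol idx 0 = -1
      · by_cases hk : k ≤ b
        · have hstep : itr_stepA k sol (c, b, rs, re, ri) idx
              = (c + 1, 0, idx + 1, idx + 1, set_region ri c rs re) := by
            simp [itr_stepA, hm, hk]
          rw [hstep, ih]
          simp [hm, hk]; ring
        · have hstep : itr_stepA k sol (c, b, rs, re, ri) idx
              = (c, 0, idx + 1, idx + 1, ri) := by
            simp [itr_stepA, hm, hk]
          rw [hstep, ih]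
          simp [hm, hk]
      · by_cases ho : PySem.List.pyGetD sol idx 0 = 1
        · have hstep : itr_stepA k sol (c, b, rs, re, ri) idx
              = (c, b + 1, rs, idx, ri) := by
            simp [itr_stepA, ho]
          rw [hstep, ih]
          simp [ho]
        · have hstep : itr_stepA k sol (c, b, rs, re, ri) idx
              = (c, b, rs, re, ri) := by
            simp [itr_stepA, hm, ho]
          rw [hstep, ih]
          simp [hm, ho]

-- B's staged split-then-count computes the same itrCount
lemma itr_foldB_count (k : Int) :
    ∀ (vs : List Int) (segs : List (List Int)) (cur : List Int),
      ((((vs.foldl split_step (segs, cur)).1 ++ [(vs.foldl split_step (segs, cur)).2]).countP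
          (fun seg => decide (k ≤ (PySem.List.count seg 1 : Int)))) : Int)
        = ((segs.countP (fun seg => decide (k ≤ (PySem.List.count seg 1 : Int)))) : Int)
          + itrCount k ((PySem.List.count cur 1 : Int)) vs := by
  intro vs
  induction vs with
  | nil =>
      intro segs cur
      simp only [List.foldl_nil, itrCount_nil, List.countP_append, List.countP_cons,
        List.countP_nil, decide_eq_true_eq]
      push_cast
      split_ifs <;> omega
  | cons v rest ih =>
      intro segs cur
      simp only [List.foldl_cons, itrCount_cons]
      by_cases hm : v = -1
      · have hstep : split_step (segs, cur) v = (segs ++ [cur], []) := by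
          simp [split_step, hm]
        rw [hstep, ih]
        simp only [List.countP_append, List.countP_cons, List.countP_nil,
          PySem.List.count_eq, List.count_nil, hm, if_true, decide_eq_true_eq]
        push_cast
        split_ifs <;> omega
      · by_cases ho : v = 1
        · have hstep : split_step (segs, cur) v = (segs, cur ++ [1]) := by
            simp [split_step, ho]
          rw [hstep, ih]
          simp [ho, PySem.List.count_eq, List.count_append]
        · have hstep : split_step (segs, cur) v = (segs, cur ++ [v]) := by
            simp [split_step, hm]
          rw [hstep, ih]
          have hc : PySem.List.count (cur ++ [v]) 1 = PySem.List.count cur 1 := by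
            simp [PySem.List.count_eq, List.count_append, ho]
          rw [hc]
          simp [hm, ho]

-- marking preserves the length of solids
lemma length_mark (solids : List Int) (a b : Int) :
    (mark_solids_array solids a b).length = solids.length := by
  unfold mark_solids_array
  induction PySem.List.pyRange a b 1 generalizing solids with
  | nil => rfl
  | cons x xs ih => simp [List.foldl_cons, ih, PySem.List.length_pySetD]

-- identify_solid_bases preserves the length of solids
lemma length_isb (local_read : List Int) (k : Int) (spec : List (List Int)) (solids : List Int) (size : Int) (aux : List Int) :
    (identify_solid_bases local_read k spec solids size aux).1.length = solids.length := by
  unfold identify_solid_bases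
  induction PySem.List.pyRange 0 (size + 1) 1 generalizing solids aux with
  | nil => rfl
  | cons x xs ih =>
      simp only [List.foldl_cons]
      split_ifs <;> simp [ih, length_mark]

-- the prefix B slices equals the value sequence A's loop reads
lemma slice_eq_map_range (sol : List Int) (n : Int) (h : n ≤ (sol.length : Int)) :
    PySem.List.slice sol none (some (max n 0))
      = (PySem.List.pyRange 0 n 1).map (fun i => PySem.List.pyGetD sol i 0) := by
  by_cases hn : n ≤ 0
  · rw [max_eq_right hn, PySem.List.pyRange_one_eq_nil hn]
    simp [PySem.List.slice_to]
  · rw [not_le] at hn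
    rw [max_eq_left hn.le, PySem.List.slice_to sol hn.le]
    have hlen : (sol.take n.toNat).length = n.toNat := by
      simp; omega
    have hmr := PySem.List.map_pyGetD_pyRange_zero (xs := sol.take n.toNat) (d := 0)
    rw [PySem.List.len_eq, hlen] at hmr
    have hcast : ((n.toNat : Int)) = n := by omega
    rw [hcast] at hmr
    rw [← hmr]
    apply List.map_congr_left
    intro i hi
    rw [PySem.List.mem_pyRange_one] at hi
    have h1 : i.toNat < n.toNat := by omega
    rw [PySem.List.pyGetD_of_nonneg _ _ hi.1, PySem.List.pyGetD_of_nonneg _ _ hi.1]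
    simp [List.getD_eq_getElem?_getD, h1]

-- ===== VERDICT (by name: the statement is the Claim_ definition above) =====
theorem identify_trusted_regions_spec : Claim_equal_identify_trusted_regions := by
  unfold Claim_equal_identify_trusted_regions
  intro seq_len kmer_spectrum local_reads kmer_len region_indices solids aux_kmer _hdom hpre
  unfold Spec_identify_trusted_regions identify_trusted_regions identify_trusted_regions_alt segs_of
  have hlen : seq_len ≤ (((identify_solid_bases local_reads kmer_len kmer_spectrum solids (seq_len - kmer_len) aux_kmer).1).length : Int) := by
    rw [length_isb]; exact hpre.2.1
  rw [itr_foldA_count, slice_eq_map_range _ seq_len hlen, itr_foldB_count]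
  simp [PySem.List.count_eq]
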